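-- pv_equiv track=rewrite | github.com/NatanaelZazueta/IA | MODULO 1/Tarea #5/Puzzle8.py | resoluble
-- ===== SOURCE A (Python) =====
-- def resoluble(tablero):
--     elementos = [num for fila in tablero for num in fila if num != 0]
--     inversiones = 0
--     for i in range(len(elementos)):
--         for j in range(i + 1, len(elementos)):
--             if elementos[i] > elementos[j]:
--                 inversiones += 1
--     return inversiones % 2 == 0
-- ===== SOURCE B (Python) =====
-- def resoluble(tablero):
--     elementos = [num for fila in tablero for num in fila if num != 0]
--
--     def msort(a):
--         # merge sort that also counts inversions: O(n log n)
--         if len(a) <= 1: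
--             return a, 0
--         mid = len(a) // 2
--         l, cl = msort(a[:mid])
--         r, cr = msort(a[mid:])
--         merged = []
--         inv = cl + cr
--         i = j = 0
--         while i < len(l) and j < len(r):
--             if l[i] <= r[j]:
--                 merged.append(l[i])
--                 i += 1
--             else:
--                 inv += len(l) - i
--                 merged.append(r[j])
--                 j += 1
--         merged.extend(l[i:])
--         merged.extend(r[j:])
--         return merged, inv
--
--     _, inv = msort(elementos)
--     return inv % 2 == 0
-- ===== Notes on version B (the rewrite author's own statement) =====
-- stated objective: faster
-- what changed: Counts inversions with a merge sort (adding the remaining left-half length on each cross pair) instead of A's nested index loops.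
import Mathlib
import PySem

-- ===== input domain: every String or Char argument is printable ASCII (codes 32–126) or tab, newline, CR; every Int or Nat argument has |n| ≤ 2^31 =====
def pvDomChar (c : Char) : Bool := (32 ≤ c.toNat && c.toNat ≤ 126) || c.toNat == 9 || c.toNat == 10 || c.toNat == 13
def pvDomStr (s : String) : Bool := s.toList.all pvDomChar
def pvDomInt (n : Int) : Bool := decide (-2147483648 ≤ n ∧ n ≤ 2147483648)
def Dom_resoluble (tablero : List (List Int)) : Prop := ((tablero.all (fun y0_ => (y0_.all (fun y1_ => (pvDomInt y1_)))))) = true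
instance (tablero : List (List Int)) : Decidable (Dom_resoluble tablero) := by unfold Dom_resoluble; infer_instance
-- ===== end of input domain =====

-- B replaces A's O(n^2) nested index loops by a merge sort that counts inversions (O(n log n)); faster asymptotically.

-- ===== PORT A =====
def resoluble (tablero : List (List Int)) : Bool :=
  let elementos := tablero.flatMap (fun fila => fila.filter (fun num => decide (num ≠ 0)))
  let inversiones : Int :=
    (PySem.List.pyRange 0 (elementos.length : Int) 1).foldl (fun inv i =>
      (PySem.List.pyRange (i + 1) (elementos.length : Int) 1).foldl (fun inv j =>
        if PySem.List.pyGetD elementos i 0 > PySem.List.pyGetD elementos j 0 then inv + 1 else inv)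
        inv) 0
  PySem.Int.mod inversiones 2 == 0

-- ===== PORT B =====
-- merge step of Source B: the i/j cursors of the while loop become the two list suffixes;
-- 'inv += len(l) - i' is the length of the remaining left suffix.
def mergeCount : List Int → List Int → List Int × Nat
  | [], r => (r, 0)
  | x :: l, [] => (x :: l, 0)
  | x :: l, y :: r =>
    if x ≤ y then
      let p := mergeCount l (y :: r)
      (x :: p.1, p.2)
    else
      let p := mergeCount (x :: l) r
      (y :: p.1, p.2 + (x :: l).length)

def msortCount (a : List Int) : List Int × Nat :=
  if a.length ≤ 1 then (a, 0)
  else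
    let mid := a.length / 2
    let pl := msortCount (a.take mid)
    let pr := msortCount (a.drop mid)
    let pm := mergeCount pl.1 pr.1
    (pm.1, pl.2 + pr.2 + pm.2)
termination_by a.length
decreasing_by
  · simp only [List.length_take]; omega
  · simp only [List.length_drop]; omega

def resoluble_alt (tablero : List (List Int)) : Bool :=
  let elementos := tablero.flatMap (fun fila => fila.filter (fun num => decide (num ≠ 0)))
  (msortCount elementos).2 % 2 == 0

-- ===== PRECONDITION & SPEC =====
def Spec_resoluble (tablero : List (List Int)) (out : Bool) : Prop := out = resoluble_alt tablero
instance (tablero : List (List Int)) (out : Bool) : Decidable (Spec_resoluble tablero out) := by unfold Spec_resoluble; infer_instance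

-- ===== CLAIM (what is proved, stated in full; the proofs are below) =====
def Claim_equal_resoluble : Prop := ∀ (tablero : List (List Int)), Dom_resoluble tablero → Spec_resoluble tablero (resoluble tablero)

-- ===== LEMMAS AND PROOFS =====

-- canonical inversion count
def inv : List Int → Nat
  | [] => 0
  | x :: xs => xs.countP (fun y => decide (y < x)) + inv xs

-- cross inversions between two blocks
def cross (l r : List Int) : Nat := (l.map (fun a => r.countP (fun b => decide (b < a)))).sum

-- ---- A side ----

lemma foldl_ext {α β : Type} (f g : α → β → α) (h : ∀ a b, f a b = g a b) :
    ∀ (l : List β) (init : α), l.foldl f init = l.foldl g init := by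
  intro l
  induction l with
  | nil => intro init; rfl
  | cons b l ih => intro init; rw [List.foldl_cons, List.foldl_cons, h, ih]

lemma inner_count (x : Int) : ∀ (l : List Int) (acc : Int),
    l.foldl (fun inv y => if x > y then inv + 1 else inv) acc
      = acc + (l.countP (fun y => decide (y < x)) : Int) := by
  intro l
  induction l with
  | nil => simp
  | cons y l ih =>
    intro acc
    simp only [List.foldl_cons, List.countP_cons, ih]
    by_cases h : y < x
    · have hx : x > y := h
      simp only [hx, if_true, decide_true]
      push_cast
      ring
    · have hx : ¬ x > y := h
      simp only [hx, if_false, decide_false]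
      push_cast
      ring

lemma range_shift (g : List Int → Nat → Nat) (hg : ∀ x e k, g (x :: e) (k + 1) = g e k) :
    ∀ (e : List Int) (x : Int) (init : Int),
    (List.range (x :: e).length).foldl (fun acc k => acc + (g (x :: e) k : Int)) init
      = (List.range e.length).foldl (fun acc k => acc + (g e k : Int)) (init + (g (x :: e) 0 : Int)) := by
  intro e x init
  rw [List.length_cons, List.range_succ_eq_map, List.foldl_cons, List.foldl_map]
  exact foldl_ext _ _ (fun acc k => by simp only [Nat.succ_eq_add_one, hg]) _ _

def gfun (e : List Int) (k : Nat) : Nat :=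
  (e.drop (k + 1)).countP (fun y => decide (y < e.getD k 0))

lemma gfun_shift (x : Int) (e : List Int) (k : Nat) : gfun (x :: e) (k + 1) = gfun e k := by
  simp [gfun]

lemma range_inv : ∀ (e : List Int) (init : Int),
    (List.range e.length).foldl (fun acc k => acc + (gfun e k : Int)) init = init + (inv e : Int) := by
  intro e
  induction e with
  | nil => simp [inv]
  | cons x e ih =>
    intro init
    rw [range_shift gfun (fun a b c => gfun_shift a b c), ih]
    simp only [gfun, inv, List.drop_zero, List.getD_cons_zero, List.drop_succ_cons]
    push_cast
    ring

lemma aLoop_eq (e : List Int) :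
    (PySem.List.pyRange 0 (e.length : Int) 1).foldl (fun inv i =>
      (PySem.List.pyRange (i + 1) (e.length : Int) 1).foldl (fun inv j =>
        if PySem.List.pyGetD e i 0 > PySem.List.pyGetD e j 0 then inv + 1 else inv) inv) 0
      = (inv e : Int) := by
  rw [PySem.List.pyRange_one, List.foldl_map]
  have h1 : ∀ (acc : Int) (k : Nat),
      (PySem.List.pyRange ((k:Int) + 1) (e.length : Int) 1).foldl
        (fun inv j => if PySem.List.pyGetD e (k:Int) 0 > PySem.List.pyGetD e j 0 then inv + 1 else inv)
        acc
      = acc + (gfun e k : Int) := by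
    intro acc k
    have hfp := PySem.List.foldl_pyRange_pyGetD' e (0 : Int)
      (fun inv y => if PySem.List.pyGetD e (k:Int) 0 > y then inv + 1 else inv) acc
      (show (0:Int) ≤ (k:Int) + 1 by positivity)
    rw [hfp]
    have ht : ((k:Int) + 1).toNat = k + 1 := by omega
    rw [ht, inner_count]
    have hg : PySem.List.pyGetD e (k:Int) 0 = e.getD k 0 := PySem.List.pyGetD_natCast e k 0
    rw [hg]
    rfl
  have hn : (((e.length : Int) - 0).toNat) = e.length := by omega
  rw [hn]
  simp only [zero_add]
  rw [foldl_ext _ _ (fun acc k => h1 acc k) (List.range e.length) 0]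
  rw [range_inv e 0]
  ring

-- ---- B side ----

lemma mergeCount_perm : ∀ (l r : List Int), (mergeCount l r).1.Perm (l ++ r) := by
  intro l r
  fun_induction mergeCount l r with
  | case1 r => simp
  | case2 x l => simp
  | case3 x l y r h p ih => exact ih.cons x
  | case4 x l y r h p ih => exact (ih.cons y).trans List.perm_middle.symm

lemma cross_cons_right (l : List Int) (y : Int) (r : List Int) :
    cross l (y :: r) = l.countP (fun a => decide (y < a)) + cross l r := by
  induction l with
  | nil => simp [cross]
  | cons x l ih =>
    simp only [cross, List.map_cons, List.sum_cons, List.countP_cons] at *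
    omega

lemma mergeCount_count : ∀ (l r : List Int), l.Pairwise (· ≤ ·) → r.Pairwise (· ≤ ·) →
    (mergeCount l r).2 = cross l r := by
  intro l r hl hr
  fun_induction mergeCount l r with
  | case1 r => simp [cross]
  | case2 x l => simp [cross, List.countP_nil]
  | case3 x l y r h p ih =>
    have h0 : (y :: r).countP (fun b => decide (b < x)) = 0 := by
      rw [List.countP_eq_zero]
      intro b hb
      rcases List.mem_cons.mp hb with rfl | hb
      · simp; omega
      · have := (List.pairwise_cons.mp hr).1 b hb
        simp; omega
    simp only [cross, List.map_cons, List.sum_cons] at *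
    rw [ih (List.Pairwise.sublist (List.sublist_cons_self x l) hl) hr, h0]
    omega
  | case4 x l y r h p ih =>
    have hcr : cross (x :: l) (y :: r) = (x :: l).countP (fun a => decide (y < a)) + cross (x :: l) r :=
      cross_cons_right (x :: l) y r
    have hall : (x :: l).countP (fun a => decide (y < a)) = (x :: l).length := by
      rw [List.countP_eq_length]
      intro a ha
      rcases List.mem_cons.mp ha with rfl | ha
      · simp; omega
      · have := (List.pairwise_cons.mp hl).1 a ha
        simp; omega
    rw [hcr, hall, ih hl (List.Pairwise.sublist (List.sublist_cons_self y r) hr)]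
    omega

lemma mergeCount_sorted : ∀ (l r : List Int), l.Pairwise (· ≤ ·) → r.Pairwise (· ≤ ·) →
    (mergeCount l r).1.Pairwise (· ≤ ·) := by
  intro l r hl hr
  fun_induction mergeCount l r with
  | case1 r => exact hr
  | case2 x l => exact hl
  | case3 x l y r h p ih =>
    have hl' := List.pairwise_cons.mp hl
    refine List.pairwise_cons.mpr ⟨?_, ih hl'.2 hr⟩
    intro b hb
    have hb' : b ∈ l ++ y :: r := (mergeCount_perm l (y :: r)).mem_iff.mp hb
    rcases List.mem_append.mp hb' with hbl | hbyr
    · exact hl'.1 b hbl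
    · rcases List.mem_cons.mp hbyr with rfl | hbr
      · exact h
      · exact le_trans h ((List.pairwise_cons.mp hr).1 b hbr)
  | case4 x l y r h p ih =>
    have hr' := List.pairwise_cons.mp hr
    refine List.pairwise_cons.mpr ⟨?_, ih hl hr'.2⟩
    intro b hb
    have hb' : b ∈ (x :: l) ++ r := (mergeCount_perm (x :: l) r).mem_iff.mp hb
    rcases List.mem_append.mp hb' with hbl | hbr
    · rcases List.mem_cons.mp hbl with rfl | hbl
      · omega
      · have := (List.pairwise_cons.mp hl).1 b hbl
        omega
    · exact hr'.1 b hbr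

lemma cross_perm {l l' r r' : List Int} (hl : l.Perm l') (hr : r.Perm r') :
    cross l r = cross l' r' := by
  unfold cross
  have h1 : ∀ a : Int, r.countP (fun b => decide (b < a)) = r'.countP (fun b => decide (b < a)) :=
    fun a => hr.countP_eq _
  calc (l.map (fun a => r.countP (fun b => decide (b < a)))).sum
      = (l.map (fun a => r'.countP (fun b => decide (b < a)))).sum := by
        congr 1; exact List.map_congr_left (fun a _ => h1 a)
    _ = (l'.map (fun a => r'.countP (fun b => decide (b < a)))).sum :=
        (hl.map _).sum_eq

lemma inv_append : ∀ (l r : List Int), inv (l ++ r) = inv l + inv r + cross l r := by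
  intro l r
  induction l with
  | nil => simp [inv, cross]
  | cons x l ih =>
    simp only [List.cons_append, inv, List.countP_append, cross, List.map_cons, List.sum_cons] at *
    omega

lemma msort_bounded : ∀ (n : Nat) (a : List Int), a.length ≤ n →
    (msortCount a).1.Perm a ∧ (msortCount a).1.Pairwise (· ≤ ·) ∧ (msortCount a).2 = inv a := by
  intro n
  induction n with
  | zero =>
    intro a ha
    match a, ha with
    | [], _ =>
      rw [msortCount, if_pos (by simp)]
      exact ⟨List.Perm.refl _, List.Pairwise.nil, rfl⟩
  | succ n ihn =>
    intro a ha
    by_cases h : a.length ≤ 1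
    · rw [msortCount, if_pos h]
      match a, h with
      | [], _ => exact ⟨List.Perm.refl _, List.Pairwise.nil, rfl⟩
      | [x], _ => exact ⟨List.Perm.refl _, by simp, rfl⟩
    · rw [msortCount, if_neg h]
      simp only
      have hmid1 : 1 ≤ a.length / 2 := by omega
      have hmid2 : a.length / 2 < a.length := by omega
      obtain ⟨hp1, hs1, hc1⟩ := ihn (a.take (a.length / 2)) (by simp [List.length_take]; omega)
      obtain ⟨hp2, hs2, hc2⟩ := ihn (a.drop (a.length / 2)) (by simp; omega)
      have hmp := mergeCount_perm (msortCount (a.take (a.length / 2))).1 (msortCount (a.drop (a.length / 2))).1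
      have htd : (a.take (a.length / 2) ++ a.drop (a.length / 2)).Perm a := by
        rw [List.take_append_drop]
      refine ⟨(hmp.trans (hp1.append hp2)).trans htd,
        mergeCount_sorted _ _ hs1 hs2, ?_⟩
      have hcm := mergeCount_count _ _ hs1 hs2
      have hx : cross (msortCount (a.take (a.length / 2))).1 (msortCount (a.drop (a.length / 2))).1
          = cross (a.take (a.length / 2)) (a.drop (a.length / 2)) := cross_perm hp1 hp2
      have hai : inv a = inv (a.take (a.length / 2)) + inv (a.drop (a.length / 2))
          + cross (a.take (a.length / 2)) (a.drop (a.length / 2)) := by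
        conv_lhs => rw [← List.take_append_drop (a.length / 2) a]
        exact inv_append _ _
      omega

lemma msort_main (a : List Int) :
    (msortCount a).1.Perm a ∧ (msortCount a).1.Pairwise (· ≤ ·) ∧ (msortCount a).2 = inv a :=
  msort_bounded a.length a (le_refl _)

-- ===== VERDICT (by name: the statement is the Claim_ definition above) =====
theorem resoluble_spec : Claim_equal_resoluble := by
  intro tablero _
  unfold Spec_resoluble resoluble resoluble_alt
  simp only
  rw [aLoop_eq, (msort_main _).2.2, PySem.Int.mod_eq_emod_of_pos (by omega)]
  rw [Bool.eq_iff_iff]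
  simp only [beq_iff_eq]
  omega
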